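-- pv_equiv track=rewrite | github.com/k-xlsx/sudoku-solver | src/sudoku/sudoku.py | _get_nums_in_squares
-- ===== SOURCE A (Python) =====
-- emptySpotChar = '0'
--
-- _constMarker = '$'
--
-- def _get_nums_in_squares(board):
--     """
--     Returns a list of nums in corresponding squares
--     (they're marked horizontally starting at the leftmost corner, heading rightwards).
--
--     Arguments:
--         board {tuple of lists} -- current board
--
--     Returns:
--         {tuple of sets} -- tuple contains sets of nums in corresponding squares
--     """
--
--     squareSize = int(len(board) / 3)
--     squareY = 3
--     squareX = squareSize
--
--     # empty list the same size as the board but filled with empty sets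
--     squares = [set()
--                for row in board]
--
--     for squareNum in range(len(board)):
--         for y in range(squareY - 3, squareY):
--             for x in range(squareX - squareSize, squareX):
--                 # adds only nums to save time
--                 if board[y][x] != emptySpotChar:
--                     squares[squareNum].add(board[y][x].replace(_constMarker, ''))
--
--         squareX += squareSize
--         if squareX > len(board):
--             squareX = int(len(board) / 3)
--             squareY += 3
--
--     return tuple(squares)
-- ===== SOURCE B (Python) =====
-- emptySpotChar = '0'
--
-- _constMarker = '$'
--
-- def _get_nums_in_squares(board):
--     """Single row-major pass over the square-covered cells: each cell's square
--     index is computed directly from its coordinates, replacing the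
--     squareX/squareY/squareNum counter bookkeeping."""
--     size = len(board)
--     squareSize = size // 3
--     squares = [set() for _ in board]
--     for y in range(size):
--         for x in range(squareSize * 3):
--             v = board[y][x]
--             if v != emptySpotChar:
--                 squares[(y // 3) * 3 + x // squareSize].add(v.replace(_constMarker, ''))
--     return tuple(squares)
-- ===== Notes on version B (the rewrite author's own statement) =====
-- stated objective: simpler
-- what changed: One row-major pass over the cells computing each cell's square index as (y//3)*3 + x//squareSize, replacing A's per-square triple loop with its squareX/squareY counter-and-reset bookkeeping.
import Mathlib
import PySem

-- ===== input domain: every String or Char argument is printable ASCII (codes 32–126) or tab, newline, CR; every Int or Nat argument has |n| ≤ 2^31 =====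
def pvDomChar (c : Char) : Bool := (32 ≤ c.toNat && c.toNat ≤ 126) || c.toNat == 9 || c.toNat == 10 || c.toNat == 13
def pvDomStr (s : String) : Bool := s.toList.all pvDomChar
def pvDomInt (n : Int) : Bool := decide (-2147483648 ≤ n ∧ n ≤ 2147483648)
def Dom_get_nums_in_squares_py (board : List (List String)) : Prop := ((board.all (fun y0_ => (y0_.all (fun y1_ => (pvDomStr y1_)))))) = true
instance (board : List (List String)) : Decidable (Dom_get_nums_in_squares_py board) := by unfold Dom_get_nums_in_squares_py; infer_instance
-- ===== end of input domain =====

-- B replaces A's per-square triple loop with its squareX/squareY counter bookkeeping by a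
-- single row-major pass computing each cell's square index from its coordinates (objective: simpler).

-- ===== PORT A =====
-- A-side helper: the 'for y / for x' inner loops of A's square loop
def pvA_inner (board : List (List String)) (squareNum squareSize squareX squareY : Int)
    (squares : List (List String)) : List (List String) :=
  (PySem.List.pyRange (squareY - 3) squareY 1).foldl
    (fun squares y =>
      (PySem.List.pyRange (squareX - squareSize) squareX 1).foldl
        (fun squares x =>
          if PySem.List.pyGetD (PySem.List.pyGetD board y []) x "" ≠ "0" then
            squares.set squareNum.toNat
              (PySem.Set.add (PySem.List.pyGetD squares squareNum [])
                (PySem.Str.replace (PySem.List.pyGetD (PySem.List.pyGetD board y []) x "") "$" ""))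
          else squares)
        squares)
    squares

-- A-side helper: one iteration of A's 'for squareNum' loop (state: squares, squareX, squareY)
def pvA_step (board : List (List String)) (squareSize : Int)
    (st : List (List String) × Int × Int) (squareNum : Int) :
    List (List String) × Int × Int :=
  ( pvA_inner board squareNum squareSize st.2.1 st.2.2 st.1,
    if st.2.1 + squareSize > (board.length : Int) then (squareSize, st.2.2 + 3)
    else (st.2.1 + squareSize, st.2.2) )

def get_nums_in_squares_py (board : List (List String)) : List (List String) :=
  ((PySem.List.pyRange 0 (board.length : Int) 1).foldl
    (pvA_step board (PySem.Int.floordiv (board.length : Int) 3))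
    (board.map (fun _ => ([] : List String)), PySem.Int.floordiv (board.length : Int) 3,
      (3 : Int))).1

-- ===== PORT B =====
def get_nums_in_squares_py_alt (board : List (List String)) : List (List String) :=
  (PySem.List.pyRange 0 (board.length : Int) 1).foldl
    (fun squares y =>
      (PySem.List.pyRange 0 (PySem.Int.floordiv (board.length : Int) 3 * 3) 1).foldl
        (fun squares x =>
          if PySem.List.pyGetD (PySem.List.pyGetD board y []) x "" ≠ "0" then
            squares.set
              (PySem.Int.floordiv y 3 * 3 +
                PySem.Int.floordiv x (PySem.Int.floordiv (board.length : Int) 3)).toNat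
              (PySem.Set.add
                (PySem.List.pyGetD squares
                  (PySem.Int.floordiv y 3 * 3 +
                    PySem.Int.floordiv x (PySem.Int.floordiv (board.length : Int) 3)) [])
                (PySem.Str.replace (PySem.List.pyGetD (PySem.List.pyGetD board y []) x "") "$" ""))
          else squares)
        squares)
    (board.map (fun _ => ([] : List String)))

-- ===== PRECONDITION & SPEC =====
-- Pre_ excludes boards with 3 ≤ len not a multiple of 3, and boards whose side is a
-- multiple of 3 but some row is shorter than the side: there the Python A either raises
-- IndexError or (sizes 4, 5, 8, …) returns sets collected only from the first band of
-- rows — an artifact of its counter reset — while the Python B raises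
-- (IndexError / ZeroDivisionError).
def Pre_get_nums_in_squares_py (board : List (List String)) : Prop :=
  board.length < 3 ∨
    (board.length % 3 = 0 ∧ ∀ row ∈ board, board.length ≤ row.length)
instance (board : List (List String)) : Decidable (Pre_get_nums_in_squares_py board) := by
  unfold Pre_get_nums_in_squares_py; infer_instance

def pvWitness_get_nums_in_squares_py : List (List String) :=
  [["1", "2", "0"], ["0", "$3", "1"], ["2", "0", "0"]]

def Spec_get_nums_in_squares_py (board : List (List String)) (out : List (List String)) : Prop := out = get_nums_in_squares_py_alt board
instance (board : List (List String)) (out : List (List String)) : Decidable (Spec_get_nums_in_squares_py board out) := by unfold Spec_get_nums_in_squares_py; infer_instance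

-- ===== CLAIM (what is proved, stated in full; the proofs are below) =====
def Claim_equal_get_nums_in_squares_py : Prop := ∀ (board : List (List String)), Dom_get_nums_in_squares_py board → Pre_get_nums_in_squares_py board → Spec_get_nums_in_squares_py board (get_nums_in_squares_py board)

-- ===== LEMMAS AND PROOFS =====
-- step mirroring both ports' loop bodies, on Nat indices
def pvStep (sq : List (List String)) (p : Nat × String) : List (List String) :=
  if p.2 ≠ "0" then
    sq.set p.1 (PySem.Set.add (sq.getD p.1 []) (PySem.Str.replace p.2 "$" ""))
  else sq

def pvScatter (ps : List (Nat × String)) (sq : List (List String)) : List (List String) :=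
  ps.foldl pvStep sq

def pvG (acc : List String) (v : String) : List String :=
  if v ≠ "0" then PySem.Set.add acc (PySem.Str.replace v "$" "") else acc

def pvPick (k : Nat) (p : Nat × String) : Option String := if p.1 = k then some p.2 else none

def pvCell (board : List (List String)) (y x : Nat) : String := (board.getD y []).getD x ""

def pvBlock (board : List (List String)) (q k : Nat) : List String :=
  (List.range 3).flatMap (fun dy => (List.range q).map (fun dx => pvCell board (3*(k/3)+dy) (q*(k%3)+dx)))

lemma pvScatter_length (ps : List (Nat × String)) (sq : List (List String)) :
    (pvScatter ps sq).length = sq.length := by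
  induction ps generalizing sq with
  | nil => rfl
  | cons p ps ih =>
    simp only [pvScatter, List.foldl_cons] at *
    rw [ih]
    unfold pvStep; split <;> simp

lemma pv_getD_set (l : List (List String)) (i k : Nat) (v d : List String) :
    (l.set i v).getD k d = if i = k ∧ k < l.length then v else l.getD k d := by
  simp [List.getD_eq_getElem?_getD, List.getElem?_set]
  split_ifs with h1 h2 h3 <;> simp_all

lemma pvScatter_getD (ps : List (Nat × String)) (sq : List (List String)) (k : Nat)
    (hk : k < sq.length) :
    (pvScatter ps sq).getD k [] = (ps.filterMap (pvPick k)).foldl pvG (sq.getD k []) := by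
  induction ps generalizing sq with
  | nil => rfl
  | cons p ps ih =>
    simp only [pvScatter, List.foldl_cons] at *
    have hlen : (pvStep sq p).length = sq.length := by unfold pvStep; split <;> simp
    rw [ih _ (by omega : k < (pvStep sq p).length)]
    by_cases hp : p.1 = k
    · have : pvPick k p = some p.2 := by simp [pvPick, hp]
      rw [List.filterMap_cons, this, List.foldl_cons]
      congr 1
      unfold pvStep pvG
      split
      · rw [pv_getD_set]; simp [hp, hk]
      · rfl
    · have : pvPick k p = none := by simp [pvPick, hp]
      rw [List.filterMap_cons, this]
      congr 1
      unfold pvStep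
      split
      · rw [pv_getD_set]; simp [hp]
      · rfl

lemma pv_flatMap_window {α : Type} (n a m : Nat) (hnm : a + m ≤ n) (f : Nat → List α)
    (hout : ∀ y, y < n → (y < a ∨ a + m ≤ y) → f y = []) :
    (List.range n).flatMap f = (List.range m).flatMap (fun dy => f (a + dy)) := by
  obtain ⟨r, rfl⟩ : ∃ r, n = a + m + r := ⟨n - a - m, by omega⟩
  have h1 : a + m + r = a + (m + r) := by omega
  rw [h1, List.range_add, List.flatMap_append, List.range_add, List.map_append,
      List.flatMap_append, List.flatMap_map, List.flatMap_map]
  have e1 : (List.range a).flatMap f = [] := by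
    apply List.flatMap_eq_nil_iff.mpr
    intro x hx; simp only [List.mem_range] at hx
    exact hout x (by omega) (Or.inl hx)
  have e3 : (List.range r).flatMap (fun x => f (a + (m + x))) = [] := by
    apply List.flatMap_eq_nil_iff.mpr
    intro x hx; simp only [List.mem_range] at hx
    exact hout (a + (m + x)) (by omega) (Or.inr (by omega))
  simp only [e1, List.nil_append]
  have : (List.range r).flatMap ((fun y => f y) ∘ fun x => a + (m + x)) = [] := e3
  simp only [List.flatMap_map] at *
  rw [e3, List.append_nil]

lemma pv_filterMap_window {α : Type} (n a m : Nat) (hnm : a + m ≤ n) (f : Nat → Option α)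
    (hout : ∀ y, y < n → (y < a ∨ a + m ≤ y) → f y = none) :
    (List.range n).filterMap f = (List.range m).filterMap (fun dy => f (a + dy)) := by
  obtain ⟨r, rfl⟩ : ∃ r, n = a + m + r := ⟨n - a - m, by omega⟩
  have h1 : a + m + r = a + (m + r) := by omega
  rw [h1, List.range_add, List.filterMap_append, List.range_add, List.map_append,
      List.filterMap_append, List.filterMap_map, List.filterMap_map]
  have e1 : (List.range a).filterMap f = [] := by
    apply List.filterMap_eq_nil_iff.mpr
    intro x hx; simp only [List.mem_range] at hx
    simp [hout x (by omega) (Or.inl hx)]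
  have e3 : (List.range r).filterMap ((f ∘ fun x => a + x) ∘ fun x => m + x) = [] := by
    apply List.filterMap_eq_nil_iff.mpr
    intro x hx; simp only [List.mem_range] at hx
    simp [Function.comp, hout (a + (m + x)) (by omega) (Or.inr (by omega))]
  rw [e1, List.filterMap_map, e3, List.nil_append, List.append_nil]
  rfl

def pvAllPairs (board : List (List String)) (q : Nat) : List (Nat × String) :=
  (List.range (3*q)).flatMap (fun y =>
    (List.range (3*q)).map (fun x => ((y/3)*3 + x/q, pvCell board y x)))

lemma pv_fd (a b : Nat) (hb : 0 < b) :
    PySem.Int.floordiv ((a : Nat) : Int) ((b : Nat) : Int) = ((a / b : Nat) : Int) := by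
  rw [PySem.Int.floordiv_eq_ediv_of_pos (by exact_mod_cast hb)]
  norm_cast

lemma pvB_scatter (board : List (List String)) (q : Nat) (hq : 0 < q) (h : board.length = 3*q) :
    get_nums_in_squares_py_alt board = pvScatter (pvAllPairs board q) (board.map fun _ => []) := by
  unfold get_nums_in_squares_py_alt pvScatter pvAllPairs
  rw [List.foldl_flatMap]
  have hfd : PySem.Int.floordiv ((board.length : Int)) 3 = (q : Int) := by
    rw [h]
    have h3 : ((3:Nat):Int) = (3:Int) := by norm_num
    rw [← h3, pv_fd _ 3 (by omega)]
    congr 1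
    omega
  rw [hfd, h]
  have h3q : ((q:Int) * 3) = ((3*q : Nat) : Int) := by push_cast; ring
  rw [h3q, PySem.List.pyRange_zero_natCast, List.foldl_map]
  congr 1
  funext squares y
  rw [List.foldl_map, List.foldl_map]
  congr 1
  funext sq x
  show (if PySem.List.pyGetD (PySem.List.pyGetD board (y:Int) []) (x:Int) "" ≠ "0" then _ else sq) = pvStep sq ((y/3)*3 + x/q, pvCell board y x)
  unfold pvStep pvCell
  have hidx : (PySem.Int.floordiv (y:Int) 3 * 3 + PySem.Int.floordiv (x:Int) (q:Int)) = (((y/3)*3 + x/q : Nat) : Int) := by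
    have h3 : ((3:Nat):Int) = (3:Int) := by norm_num
    rw [← h3, pv_fd y 3 (by omega), pv_fd x q hq]
    push_cast; ring
  simp only [hidx, PySem.List.pyGetD_natCast, Int.toNat_natCast]

lemma pv_idx_ne (k g f : Nat) (hf : f < 3) (hg : g ≠ k/3) : g*3 + f ≠ k := by omega

lemma pv_idx_ne2 (k f : Nat) (hf : f ≠ k%3) : k/3*3 + f ≠ k := by omega

lemma pvAll_filter (board : List (List String)) (q k : Nat) (hk : k < 3*q) :
    (pvAllPairs board q).filterMap (pvPick k) = pvBlock board q k := by
  have hq : 0 < q := by omega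
  have hb : k/3 < q := by omega
  have hc : k%3 < 3 := by omega
  have hqc : q*(k%3) + q ≤ 3*q := by
    rcases (by omega : k%3 = 0 ∨ k%3 = 1 ∨ k%3 = 2) with h|h|h <;> rw [h] <;> omega
  unfold pvAllPairs pvBlock
  rw [List.filterMap_flatMap]
  refine (pv_flatMap_window (3*q) (3*(k/3)) 3 (by omega) _ ?_).trans ?_
  · intro y hy hout
    apply List.filterMap_eq_nil_iff.mpr
    intro p hp
    rw [List.mem_map] at hp
    obtain ⟨x, hx, rfl⟩ := hp
    simp only [List.mem_range] at hx
    have hxq : x/q < 3 := Nat.div_lt_of_lt_mul (by omega)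
    have hy3 : y/3 ≠ k/3 := by rcases hout with h1 | h1 <;> omega
    simp only [pvPick]
    exact if_neg (pv_idx_ne k (y/3) (x/q) hxq hy3)
  · apply List.flatMap_congr
    intro dy hdy
    simp only [List.mem_range] at hdy
    rw [List.filterMap_map]
    have hy3 : (3*(k/3) + dy)/3 = k/3 := by omega
    refine (pv_filterMap_window (3*q) (q*(k%3)) q hqc _ ?_).trans ?_
    · intro x hx hout
      have hxq : x/q ≠ k%3 := by
        rcases hout with h1 | h1
        · have : x/q < k%3 := Nat.div_lt_of_lt_mul (by omega)
          omega
        · have hmul : (k%3 + 1) * q ≤ x := by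
            calc (k%3 + 1) * q = q*(k%3) + q := by ring
              _ ≤ x := by omega
          have : k%3 + 1 ≤ x/q := (Nat.le_div_iff_mul_le hq).mpr hmul
          omega
      have hcond : ¬ ((3*(k/3)+dy)/3*3 + x/q = k) := by
        rw [(by omega : (3*(k/3) + dy)/3 = k/3)]
        exact pv_idx_ne2 k (x/q) hxq
      simp only [Function.comp, pvPick]
      exact if_neg hcond
    · have : ∀ dx ∈ List.range q,
          (pvPick k ∘ fun x => ((3*(k/3)+dy)/3*3 + x/q, pvCell board (3*(k/3)+dy) x)) (q*(k%3) + dx)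
          = some (pvCell board (3*(k/3)+dy) (q*(k%3)+dx)) := by
        intro dx hdx
        simp only [List.mem_range] at hdx
        have hdq : (q*(k%3) + dx)/q = k%3 := by
          rw [Nat.mul_add_div hq, Nat.div_eq_of_lt hdx]
          omega
        have hcond : (3*(k/3)+dy)/3*3 + (q*(k%3) + dx)/q = k := by
          rw [hy3, hdq]; omega
        simp [pvPick, hcond]
      rw [List.filterMap_congr this]
      simp

def pvBlockPairs (board : List (List String)) (q n : Nat) : List (Nat × String) :=
  (List.range n).flatMap (fun k' => (pvBlock board q k').map (fun v => (k', v)))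

lemma pvBlockPairs_filter (board : List (List String)) (q n k : Nat) (hk : k < n) :
    (pvBlockPairs board q n).filterMap (pvPick k) = pvBlock board q k := by
  unfold pvBlockPairs
  rw [List.filterMap_flatMap]
  refine (pv_flatMap_window n k 1 (by omega) _ ?_).trans ?_
  · intro y hy hout
    apply List.filterMap_eq_nil_iff.mpr
    intro p hp
    rw [List.mem_map] at hp
    obtain ⟨v, hv, rfl⟩ := hp
    simp [pvPick]
    omega
  · simp only [List.range_one, List.flatMap_cons, List.flatMap_nil, List.append_nil,
      Nat.add_zero, List.filterMap_map]
    have : ∀ v ∈ pvBlock board q k, (pvPick k ∘ fun v => (k, v)) v = some v := by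
      intro v _; simp [pvPick]
    rw [List.filterMap_congr this]
    simp

lemma pvScatter_append (ps ps' : List (Nat × String)) (sq : List (List String)) :
    pvScatter (ps ++ ps') sq = pvScatter ps' (pvScatter ps sq) := by
  unfold pvScatter; rw [List.foldl_append]

lemma pvA_inner_scatter (board : List (List String)) (q k : Nat) (hq : 0 < q)
    (squares : List (List String)) :
    pvA_inner board (k : Int) (q : Int) ((q*(k%3+1) : Nat) : Int) ((3*(k/3+1) : Nat) : Int) squares
      = pvScatter ((pvBlock board q k).map (fun v => (k, v))) squares := by
  unfold pvA_inner pvScatter pvBlock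
  rw [List.map_flatMap, List.foldl_flatMap]
  have hy : ((3*(k/3+1) : Nat) : Int) - 3 = ((3*(k/3) : Nat) : Int) := by push_cast; ring
  have hx : ((q*(k%3+1) : Nat) : Int) - (q : Int) = ((q*(k%3) : Nat) : Int) := by push_cast; ring
  rw [hy, hx, PySem.List.pyRange_one, PySem.List.pyRange_one]
  have hyl : (((3*(k/3+1) : Nat) : Int) - ((3*(k/3) : Nat) : Int)).toNat = 3 := by push_cast; omega
  have hxl : (((q*(k%3+1) : Nat) : Int) - ((q*(k%3) : Nat) : Int)).toNat = q := by
    rw [(by ring : q*(k%3+1) = q*(k%3) + q)]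
    push_cast; omega
  rw [hyl, hxl, List.foldl_map]
  congr 1
  funext sq dy
  rw [List.foldl_map, List.map_map, List.foldl_map]
  congr 1
  funext sq2 dx
  unfold pvStep pvCell
  have e1 : ((3*(k/3) : Nat) : Int) + (dy:Int) = ((3*(k/3)+dy : Nat) : Int) := by push_cast; ring
  have e2 : ((q*(k%3) : Nat) : Int) + (dx:Int) = ((q*(k%3)+dx : Nat) : Int) := by push_cast; ring
  simp only [e1, e2, PySem.List.pyGetD_natCast, Int.toNat_natCast, Function.comp_apply]

lemma pvBlockPairs_succ (board : List (List String)) (q j : Nat) :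
    pvBlockPairs board q (j+1)
      = pvBlockPairs board q j ++ (pvBlock board q j).map (fun v => (j, v)) := by
  unfold pvBlockPairs
  rw [List.range_succ, List.flatMap_append]
  simp

lemma pvA_loop (board : List (List String)) (q : Nat) (hq : 0 < q)
    (h : board.length = 3*q) (j : Nat) :
    (PySem.List.pyRange 0 (j : Int) 1).foldl (pvA_step board (q : Int))
        (board.map (fun _ => ([] : List String)), (q : Int), (3 : Int))
      = (pvScatter (pvBlockPairs board q j) (board.map (fun _ => ([] : List String))),
          ((q*(j%3+1) : Nat) : Int), ((3*(j/3+1) : Nat) : Int)) := by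
  induction j with
  | zero =>
    rw [PySem.List.pyRange_one_eq_nil (by omega)]
    simp [pvBlockPairs, pvScatter]
  | succ j ih =>
    have hcast : ((j+1 : Nat) : Int) = (j : Int) + 1 := by push_cast; ring
    rw [hcast, PySem.List.pyRange_one_succ_right (by omega), List.foldl_append,
        ih, List.foldl_cons, List.foldl_nil]
    unfold pvA_step
    simp only
    rw [pvA_inner_scatter board q j hq, ← pvScatter_append, ← pvBlockPairs_succ]
    have hcast2 : ((q*(j%3+1) : Nat) : Int) + (q : Int) = ((q*(j%3+1)+q : Nat) : Int) := by
      push_cast; ring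
    have hcond : (((q*(j%3+1) : Nat) : Int) + (q : Int) > ((board.length : Nat) : Int))
        ↔ j % 3 = 2 := by
      rw [h, hcast2, gt_iff_lt, Int.ofNat_lt]
      constructor
      · intro hgt
        by_contra hne
        rcases (by omega : j%3 = 0 ∨ j%3 = 1) with h1|h1 <;> rw [h1] at hgt <;> omega
      · intro h2
        rw [h2]
        omega
    by_cases hj3 : j % 3 = 2
    · rw [if_pos (hcond.mpr hj3)]
      have e1 : ((q : Nat) : Int) = ((q*((j+1)%3+1) : Nat) : Int) := by
        have : (j+1)%3 = 0 := by omega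
        rw [this]; push_cast; ring
      have e2 : ((3*(j/3+1) : Nat) : Int) + 3 = ((3*((j+1)/3+1) : Nat) : Int) := by
        have : (j+1)/3 = j/3 + 1 := by omega
        rw [this]; push_cast; ring
      rw [e1, e2]
    · rw [if_neg (fun hc => hj3 (hcond.mp hc))]
      have e1 : ((q*(j%3+1) : Nat) : Int) + (q : Int) = ((q*((j+1)%3+1) : Nat) : Int) := by
        have h1 : (j+1)%3 = j%3 + 1 := by omega
        rw [h1, (by ring : q*(j%3+1+1) = q*(j%3+1) + q)]
        push_cast; ring
      have e2 : ((3*(j/3+1) : Nat) : Int) = ((3*((j+1)/3+1) : Nat) : Int) := by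
        have : (j+1)/3 = j/3 := by omega
        rw [this]
      rw [e1, e2]

lemma pvA_scatter (board : List (List String)) (q : Nat) (hq : 0 < q)
    (h : board.length = 3*q) :
    get_nums_in_squares_py board
      = pvScatter (pvBlockPairs board q (3*q)) (board.map fun _ => []) := by
  unfold get_nums_in_squares_py
  have hfd : PySem.Int.floordiv ((board.length : Int)) 3 = (q : Int) := by
    rw [h]
    have h3 : ((3:Nat):Int) = (3:Int) := by norm_num
    rw [← h3, pv_fd _ 3 (by omega)]
    congr 1
    omega
  rw [hfd, h, pvA_loop board q hq h (3*q)]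

lemma pv_main (board : List (List String)) (q : Nat) (hq : 0 < q) (h : board.length = 3*q) :
    get_nums_in_squares_py board = get_nums_in_squares_py_alt board := by
  rw [pvA_scatter board q hq h, pvB_scatter board q hq h]
  have hlen : (board.map (fun _ => ([] : List String))).length = 3*q := by simp [h]
  apply List.ext_getElem
  · rw [pvScatter_length, pvScatter_length]
  · intro k h1 h2
    have hk : k < 3*q := by rwa [pvScatter_length, hlen] at h1
    rw [← List.getD_eq_getElem _ ([] : List String) h1,
        ← List.getD_eq_getElem _ ([] : List String) h2,
        pvScatter_getD _ _ _ (by rw [hlen]; exact hk),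
        pvScatter_getD _ _ _ (by rw [hlen]; exact hk),
        pvAll_filter board q k hk, pvBlockPairs_filter board q (3*q) k hk]

set_option maxHeartbeats 1000000 in
lemma pv_small (board : List (List String)) (h : board.length < 3) :
    get_nums_in_squares_py board = get_nums_in_squares_py_alt board := by
  rcases board with _ | ⟨a, _ | ⟨b, _ | ⟨c, t⟩⟩⟩
  · rfl
  · norm_num [get_nums_in_squares_py, get_nums_in_squares_py_alt, pvA_step, pvA_inner, pysem]
  · norm_num [get_nums_in_squares_py, get_nums_in_squares_py_alt, pvA_step, pvA_inner, pysem]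
  · simp only [List.length_cons] at h
    omega

-- ===== VERDICT (by name: the statement is the Claim_ definition above) =====
theorem get_nums_in_squares_py_spec : Claim_equal_get_nums_in_squares_py := by
  intro board _ hpre
  unfold Spec_get_nums_in_squares_py
  by_cases hlt : board.length < 3
  · exact pv_small board hlt
  · rcases hpre with h | ⟨h3, _⟩
    · exact absurd h hlt
    · exact pv_main board (board.length / 3) (by omega) (by omega)
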